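-- pv_equiv track=rewrite | github.com/microsoft/optimizn | optimizn/ab_split/testing/test_opt_cases.py | calc_sol_delta
-- ===== SOURCE A (Python) =====
-- def calc_sol_delta(arr, split):
--     total_delta = 0
--     for i in range(len(arr)):
--         ar = arr[i]
--         sum1 = sum(ar)
--         cnt1 = sum([ar[ix] for ix in split])
--         total_delta += abs(sum1 - 2*cnt1)
--     return total_delta
-- ===== SOURCE B (Python) =====
-- def calc_sol_delta(arr, split):
--     # loop-interchange: one pass over split updates a per-row accumulator vector,
--     # then a final zipped pass combines row sums with the accumulated split sums
--     cnts = [0] * len(arr)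
--     for ix in split:
--         cnts = [c + ar[ix] for c, ar in zip(cnts, arr)]
--     return sum(abs(sum(ar) - 2 * c) for ar, c in zip(arr, cnts))
-- ===== Notes on version B (the rewrite author's own statement) =====
-- stated objective: alternative
-- what changed: B interchanges the loops: a single pass over split accumulates a per-row counter vector column-wise (each split index adds one value to every row's counter at once), and a final zipped pass over rows combines row sums with the accumulated counters, instead of A's per-row rescan of the whole split list.
import Mathlib
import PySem

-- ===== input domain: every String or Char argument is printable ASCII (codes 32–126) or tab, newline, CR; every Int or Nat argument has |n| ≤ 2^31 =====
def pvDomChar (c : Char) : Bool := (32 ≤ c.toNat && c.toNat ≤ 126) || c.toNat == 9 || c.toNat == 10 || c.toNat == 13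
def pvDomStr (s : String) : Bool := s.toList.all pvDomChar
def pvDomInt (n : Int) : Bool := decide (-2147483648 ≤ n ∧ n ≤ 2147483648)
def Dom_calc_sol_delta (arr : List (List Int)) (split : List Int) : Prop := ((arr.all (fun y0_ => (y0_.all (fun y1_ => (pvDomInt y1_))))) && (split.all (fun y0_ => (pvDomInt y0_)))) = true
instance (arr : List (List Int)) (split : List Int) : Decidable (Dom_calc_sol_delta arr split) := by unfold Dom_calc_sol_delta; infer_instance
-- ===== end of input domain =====

-- B interchanges the loops: one pass over split accumulates a per-row counter vector
-- column-wise, then a zipped pass over rows combines row sums with the counters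
-- (alternative decomposition; same return values wherever A returns).

-- ===== PORT A =====
-- for i in range(len(arr)): sum the row, sum ar[ix] over split, accumulate |sum1 - 2*cnt1|
def calc_sol_delta (arr : List (List Int)) (split : List Int) : Int :=
  (PySem.List.pyRange 0 (PySem.List.len arr) 1).foldl
    (fun total_delta i =>
      let ar := PySem.List.pyGetD arr i []
      let sum1 := ar.sum
      let cnt1 := (split.map (fun ix => PySem.List.pyGetD ar ix 0)).sum
      total_delta + |sum1 - 2 * cnt1|) 0

-- ===== PORT B =====
-- cnts = [0]*len(arr); for ix in split: cnts = [c + ar[ix] for c, ar in zip(cnts, arr)];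
-- return sum(abs(sum(ar) - 2*c) for ar, c in zip(arr, cnts))
def calc_sol_delta_alt (arr : List (List Int)) (split : List Int) : Int :=
  let cnts := split.foldl
    (fun cnts ix => (cnts.zip arr).map (fun p => p.1 + PySem.List.pyGetD p.2 ix 0))
    (List.replicate arr.length 0)
  ((arr.zip cnts).map (fun p => |p.1.sum - 2 * p.2|)).sum

-- ===== PRECONDITION & SPEC =====
-- Pre_ excludes exactly the inputs on which Python A raises IndexError: some index in
-- split out of range (Python's negative-index rule) for some row. B raises there too.
def Pre_calc_sol_delta (arr : List (List Int)) (split : List Int) : Prop :=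
  ∀ ar ∈ arr, ∀ ix ∈ split, -(ar.length : Int) ≤ ix ∧ ix < (ar.length : Int)
instance (arr : List (List Int)) (split : List Int) : Decidable (Pre_calc_sol_delta arr split) := by
  unfold Pre_calc_sol_delta; infer_instance

def pvWitness_calc_sol_delta : List (List Int) × List Int := ([[1, 2, 3], [4, -5, 6]], [0, -1, 0])

def Spec_calc_sol_delta (arr : List (List Int)) (split : List Int) (out : Int) : Prop := out = calc_sol_delta_alt arr split
instance (arr : List (List Int)) (split : List Int) (out : Int) : Decidable (Spec_calc_sol_delta arr split out) := by unfold Spec_calc_sol_delta; infer_instance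

-- ===== CLAIM (what is proved, stated in full; the proofs are below) =====
def Claim_equal_calc_sol_delta : Prop := ∀ (arr : List (List Int)) (split : List Int), Dom_calc_sol_delta arr split → Pre_calc_sol_delta arr split → Spec_calc_sol_delta arr split (calc_sol_delta arr split)

-- ===== LEMMAS AND PROOFS =====

-- zipping (l.map f) with l pairs each element with its image
theorem zip_map_self {α β : Type} (l : List α) (f : α → β) :
    (l.map f).zip l = l.map (fun a => (f a, a)) := by
  induction l with
  | nil => rfl
  | cons x xs ih => simp [ih]

-- and the mirror image: zipping l with (l.map f)
theorem zip_map_self' {α β : Type} (l : List α) (f : α → β) :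
    l.zip (l.map f) = l.map (fun a => (a, f a)) := by
  induction l with
  | nil => rfl
  | cons x xs ih => simp [ih]

-- B's column-wise accumulation, started at arr.map g, yields each row's g plus its split-sum
theorem cnts_foldl_eq (arr : List (List Int)) (split : List Int) (g : List Int → Int) :
    split.foldl
      (fun cnts ix => (cnts.zip arr).map (fun p => p.1 + PySem.List.pyGetD p.2 ix 0))
      (arr.map g)
    = arr.map (fun ar => g ar + (split.map (fun ix => PySem.List.pyGetD ar ix 0)).sum) := by
  induction split generalizing g with
  | nil => simp
  | cons ix rest ih =>
    simp only [List.foldl_cons]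
    have hz : ((arr.map g).zip arr).map (fun p => p.1 + PySem.List.pyGetD p.2 ix 0)
        = arr.map (fun ar => g ar + PySem.List.pyGetD ar ix 0) := by
      rw [zip_map_self, List.map_map]
      simp [Function.comp_def]
    rw [hz, ih]
    simp [add_assoc]

-- folding + over a list from 0 is the sum of the mapped list
theorem foldl_add_eq_sum_map {α : Type} (l : List α) (h : α → Int) (acc : Int) :
    l.foldl (fun a x => a + h x) acc = acc + (l.map h).sum := by
  induction l generalizing acc with
  | nil => simp
  | cons x xs ih => simp [ih, add_assoc]

-- ===== VERDICT (by name: the statement is the Claim_ definition above) =====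
theorem calc_sol_delta_spec : Claim_equal_calc_sol_delta := by
  intro arr split _ _
  show calc_sol_delta arr split = calc_sol_delta_alt arr split
  have hA : calc_sol_delta arr split
      = arr.foldl (fun acc ar =>
          acc + |ar.sum - 2 * (split.map (fun ix => PySem.List.pyGetD ar ix 0)).sum|) 0 :=
    PySem.List.foldl_pyRange_zero_pyGetD arr []
      (fun acc ar => acc + |ar.sum - 2 * (split.map (fun ix => PySem.List.pyGetD ar ix 0)).sum|) 0
  have hrep : List.replicate arr.length (0 : Int) = arr.map (fun _ => 0) := by
    simp
  have hB : calc_sol_delta_alt arr split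
      = ((arr.zip (arr.map (fun ar =>
            (0 : Int) + (split.map (fun ix => PySem.List.pyGetD ar ix 0)).sum))).map
          (fun p => |p.1.sum - 2 * p.2|)).sum := by
    unfold calc_sol_delta_alt
    rw [hrep, cnts_foldl_eq]
  have hz : arr.zip (arr.map (fun ar =>
        (0 : Int) + (split.map (fun ix => PySem.List.pyGetD ar ix 0)).sum))
      = arr.map (fun ar => (ar, (0 : Int) + (split.map (fun ix => PySem.List.pyGetD ar ix 0)).sum)) := by
    exact zip_map_self' arr _
  rw [hA, hB, hz, List.map_map, foldl_add_eq_sum_map]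
  simp [Function.comp_def]
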